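-- pv_equiv track=rewrite | github.com/alexwday/meeting-notes | launch.py | parse_bootstrap_values
-- ===== SOURCE A (Python) =====
-- def parse_bootstrap_values(raw: object) -> list[str]:
--     if isinstance(raw, str):
--         return [value.strip() for value in raw.replace("\r", "\n").replace(",", "\n").split("\n") if value.strip()]
--     if isinstance(raw, list):
--         values: list[str] = []
--         for item in raw:
--             if isinstance(item, str) and item.strip():
--                 values.append(item.strip())
--         return values
--     return []
-- ===== SOURCE B (Python) =====
-- def parse_bootstrap_values(raw: object) -> list[str]:
--     if isinstance(raw, str):
--         values: list[str] = []
--         cur: list[str] = []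
--         for ch in raw:
--             if ch in "\r\n,":
--                 token = "".join(cur).strip()
--                 if token:
--                     values.append(token)
--                 cur = []
--             else:
--                 cur.append(ch)
--         token = "".join(cur).strip()
--         if token:
--             values.append(token)
--         return values
--     if isinstance(raw, list):
--         return [item.strip() for item in raw if isinstance(item, str) and item.strip()]
--     return []
-- ===== Notes on version B (the rewrite author's own statement) =====
-- stated objective: alternative
-- what changed: Replaced A's three full string passes (two replace calls plus a split) followed by a strip/filter comprehension with a single left-to-right character scan that cuts a token at each separator character (CR, LF or comma) and strips/filters each token as it is closed.
import Mathlib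
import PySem

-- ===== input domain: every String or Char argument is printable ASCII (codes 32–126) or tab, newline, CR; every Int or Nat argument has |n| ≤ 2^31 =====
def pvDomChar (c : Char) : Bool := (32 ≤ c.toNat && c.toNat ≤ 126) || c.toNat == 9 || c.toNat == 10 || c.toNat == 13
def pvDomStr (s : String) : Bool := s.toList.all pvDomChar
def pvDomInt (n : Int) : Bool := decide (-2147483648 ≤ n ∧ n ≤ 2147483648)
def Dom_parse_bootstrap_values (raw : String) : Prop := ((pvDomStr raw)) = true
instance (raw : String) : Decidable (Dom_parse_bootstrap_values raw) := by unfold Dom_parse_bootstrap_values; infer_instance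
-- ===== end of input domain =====

-- B replaces A's three full string passes (two replaces and a split) plus a strip/filter
-- comprehension by a single left-to-right character scan (objective: alternative).


-- ===== PORT A =====
-- Python s.split(sep) for the nonempty literal sep "\n" (the Chars definition lifted to String)
def pbvSplit (s sep : String) : List String :=
  (PySem.Chars.splitOn s.toList sep.toList).map String.ofList

def parse_bootstrap_values (raw : String) : List String :=
  ((pbvSplit (PySem.Str.replace (PySem.Str.replace raw "\r" "\n") "," "\n") "\n").filter
      (fun v => PySem.Str.strip v != "")).map (fun v => PySem.Str.strip v)

-- ===== PORT B =====
-- close the current token: strip it, keep it if nonempty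
def pbvFlush (cur : List Char) (values : List String) : List String :=
  let token := PySem.Str.strip (String.ofList cur)
  if token = "" then values else values ++ [token]

-- the single pass over the characters
def pbvGo : List Char → List Char → List String → List String
  | [], cur, values => pbvFlush cur values
  | c :: rest, cur, values =>
    if c = '\r' ∨ c = '\n' ∨ c = ',' then pbvGo rest [] (pbvFlush cur values)
    else pbvGo rest (cur ++ [c]) values

def parse_bootstrap_values_alt (raw : String) : List String :=
  pbvGo raw.toList [] []

-- ===== PRECONDITION & SPEC =====
def Spec_parse_bootstrap_values (raw : String) (out : List String) : Prop := out = parse_bootstrap_values_alt raw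
instance (raw : String) (out : List String) : Decidable (Spec_parse_bootstrap_values raw out) := by unfold Spec_parse_bootstrap_values; infer_instance

-- ===== CLAIM (what is proved, stated in full; the proofs are below) =====
def Claim_equal_parse_bootstrap_values : Prop := ∀ (raw : String), Dom_parse_bootstrap_values raw → Spec_parse_bootstrap_values raw (parse_bootstrap_values raw)

-- ===== LEMMAS AND PROOFS =====

-- single-character substitution, what replace with one-char old/new amounts to
def pvSub (a b c : Char) : Char := if c = a then b else c

lemma pbv_replace_go (a b : Char) : ∀ (fuel : Nat) (l acc : List Char), l.length ≤ fuel →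
    PySem.Chars.replace.go [a] [b] fuel l acc = acc.reverse ++ l.map (pvSub a b) := by
  intro fuel
  induction fuel with
  | zero => intro l acc h; simp at h; simp [h, PySem.Chars.replace.go]
  | succ n ih =>
    intro l acc h
    cases l with
    | nil => simp [PySem.Chars.replace.go]
    | cons c t =>
      simp only [PySem.Chars.replace.go]
      by_cases hc : c = a
      · simp [hc, List.isPrefixOf, ih t _ (by simpa using h), pvSub]
      · simp [List.isPrefixOf, hc, ih t _ (by simpa using h), Ne.symm hc, pvSub]

lemma pbv_replace_single (cs : List Char) (a b : Char) :
    PySem.Chars.replace cs [a] [b] = cs.map (pvSub a b) := by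
  simp [PySem.Chars.replace, pbv_replace_go a b cs.length cs [] le_rfl]

lemma pbv_modifyHead_nil_append (l : List (List Char)) :
    l.modifyHead (fun x => [] ++ x) = l := by cases l <;> simp

lemma pbv_split_go (a : Char) : ∀ (fuel : Nat) (l cur : List Char) (acc : List (List Char)),
    l.length ≤ fuel →
    PySem.Chars.splitOn.go [a] fuel l cur acc =
      acc.reverse ++ ((l.splitOn a).modifyHead (cur.reverse ++ ·)) := by
  intro fuel
  induction fuel with
  | zero => intro l cur acc h; simp at h; simp [h, PySem.Chars.splitOn.go, List.splitOn]
  | succ n ih =>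
    intro l cur acc h
    cases l with
    | nil => simp [PySem.Chars.splitOn.go, List.splitOn]
    | cons c t =>
      simp only [PySem.Chars.splitOn.go]
      by_cases hc : c = a
      · simp [hc, List.isPrefixOf, ih t _ _ (by simpa using h), List.splitOn, List.splitOnP_cons]
        rw [show (fun x : List Char => x) = id from rfl, List.modifyHead_id]
        rfl
      · simp [List.isPrefixOf, hc, ih t _ _ (by simpa using h), Ne.symm hc, List.splitOn,
          List.splitOnP_cons, List.modifyHead_modifyHead]
        rfl

lemma pbv_splitOn_single (cs : List Char) (a : Char) :
    PySem.Chars.splitOn cs [a] = cs.splitOn a := by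
  rw [PySem.Chars.splitOn, pbv_split_go a (cs.length + 1) cs [] [] (by omega)]
  simp only [List.reverse_nil, List.nil_append]
  rw [show (fun x : List Char => x) = id from rfl, List.modifyHead_id]
  rfl

-- A's strip/filter comprehension, pushed from strings down to the char lists
lemma pbv_a_side (L : List (List Char)) :
    ((L.map String.ofList).filter (fun v => PySem.Str.strip v != "")).map (fun v => PySem.Str.strip v)
      = (L.filter (fun v => PySem.Str.strip (String.ofList v) != "")).map
          (fun v => PySem.Str.strip (String.ofList v)) := by
  induction L with
  | nil => simp
  | cons c t ih =>
    by_cases h : PySem.Str.strip (String.ofList c) != ""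
    · simp [h, ih]
    · simp [h, ih]

-- the invariant of B's scan: it computes A's filter/map over the split of the substituted chars
lemma pbv_splitOn_cons (a c : Char) (t : List Char) :
    (c :: t).splitOn a =
      if c = a then [] :: t.splitOn a else (t.splitOn a).modifyHead (c :: ·) := by
  by_cases h : c = a <;> simp [List.splitOn, List.splitOnP_cons, h]

lemma pbv_main : ∀ (cs cur : List Char) (values : List String),
    pbvGo cs cur values =
      values ++
        ((((cs.map (fun c => pvSub ',' '\n' (pvSub '\r' '\n' c))).splitOn '\n').modifyHead
            (cur ++ ·)).filter (fun v => PySem.Str.strip (String.ofList v) != "")).map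
          (fun v => PySem.Str.strip (String.ofList v)) := by
  intro cs
  induction cs with
  | nil =>
    intro cur values
    rw [show pbvGo [] cur values = pbvFlush cur values from rfl, List.map_nil]
    rw [show ([] : List Char).splitOn '\n' = [[]] by simp [List.splitOn, List.splitOnP_nil]]
    simp only [List.modifyHead_cons, List.append_nil, List.filter_cons]
    unfold pbvFlush
    by_cases h : PySem.Str.strip (String.ofList cur) = ""
    · simp [h]
    · simp [h]
  | cons c t ih =>
    intro cur values
    by_cases hsep : c = '\r' ∨ c = '\n' ∨ c = ','
    · have hσ : pvSub ',' '\n' (pvSub '\r' '\n' c) = '\n' := by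
        rcases hsep with h | h | h <;> simp [h, pvSub]
      simp only [pbvGo, if_pos hsep, List.map_cons, hσ, pbv_splitOn_cons]
      rw [ih [] (pbvFlush cur values), pbv_modifyHead_nil_append]
      unfold pbvFlush
      by_cases h : PySem.Str.strip (String.ofList cur) = ""
      · simp [h]
      · simp [h]
    · have hc : c ≠ '\r' ∧ c ≠ '\n' ∧ c ≠ ',' := by
        refine ⟨fun h => hsep (Or.inl h), fun h => hsep (Or.inr (Or.inl h)),
          fun h => hsep (Or.inr (Or.inr h))⟩
      have hσ : pvSub ',' '\n' (pvSub '\r' '\n' c) = c := by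
        simp [pvSub, hc.1, hc.2.2]
      simp only [pbvGo, if_neg hsep, List.map_cons, hσ, pbv_splitOn_cons, if_neg hc.2.1,
        List.modifyHead_modifyHead]
      rw [ih (cur ++ [c]) values,
        show ((fun x : List Char => cur ++ x) ∘ (fun x => c :: x)) =
            (fun x => (cur ++ [c]) ++ x) by funext x; simp]

-- ===== VERDICT (by name: the statement is the Claim_ definition above) =====
theorem parse_bootstrap_values_spec : Claim_equal_parse_bootstrap_values := by
  intro raw _
  unfold Spec_parse_bootstrap_values parse_bootstrap_values parse_bootstrap_values_alt pbvSplit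
  have h1 : ("\r" : String).toList = ['\r'] := rfl
  have h2 : ("," : String).toList = [','] := rfl
  have h3 : ("\n" : String).toList = ['\n'] := rfl
  simp only [PySem.Str.replace, String.toList_ofList, h1, h2, h3,
    pbv_replace_single, List.map_map]
  rw [pbv_splitOn_single, pbv_a_side, pbv_main raw.toList [] [],
    pbv_modifyHead_nil_append]
  rfl
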